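-- pv_equiv track=rewrite | github.com/juanjo78git/project-euler | projecteuler/problems/d0125/p0125/r0125.py | is_0125
-- ===== SOURCE A (Python) =====
-- def is_0125(squares, p):
--     """ dado una lista de cuadrados y un palindromo intenta ver si cumple """
--     for i in range(len(squares)):
--         # si el cuadrado ya es mayor que p debemos salir
--         if squares[i] > p:
--             break
--         for j in range(i + 2, len(squares)):
--             sumatory = sum(squares[i:j])
--             if sumatory == p:
--                 return True
--             elif sumatory > p:
--                 break
--
--     return False
-- ===== SOURCE B (Python) =====
-- def is_0125(squares, p):
--     """Prefix-sum re-implementation: window sums come from a precomputed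
--     prefix array (O(1) each) instead of re-summing a slice per window."""
--     pref = [0]
--     acc = 0
--     for x in squares:
--         acc += x
--         pref.append(acc)
--     n = len(squares)
--     for i, x in enumerate(squares):
--         if x > p:
--             break
--         base = pref[i]
--         for j in range(i + 2, n):
--             w = pref[j] - base
--             if w == p:
--                 return True
--             if w > p:
--                 break
--     return False
-- ===== Notes on version B (the rewrite author's own statement) =====
-- stated objective: faster
-- what changed: B precomputes a prefix-sum array once and reads each window sum as pref[j]-pref[i] in O(1), instead of re-summing the slice squares[i:j] for every (i,j) pair.
import Mathlib
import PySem

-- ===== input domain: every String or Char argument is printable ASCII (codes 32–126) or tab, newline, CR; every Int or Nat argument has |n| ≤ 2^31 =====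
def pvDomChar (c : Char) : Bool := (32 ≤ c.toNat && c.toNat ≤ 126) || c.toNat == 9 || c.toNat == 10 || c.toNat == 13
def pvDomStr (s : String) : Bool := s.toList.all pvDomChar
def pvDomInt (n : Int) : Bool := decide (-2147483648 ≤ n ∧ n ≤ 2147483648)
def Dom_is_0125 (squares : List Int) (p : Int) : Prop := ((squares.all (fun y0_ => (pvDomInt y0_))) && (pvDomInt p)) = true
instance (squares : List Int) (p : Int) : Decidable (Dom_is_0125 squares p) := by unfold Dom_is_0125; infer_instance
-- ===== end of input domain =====

-- B replaces A's per-window slice re-summation by a prefix-sum array read in O(1) per window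
-- (objective: faster, O(n^3) → O(n^2)); return values are proved identical on all inputs.

-- ===== PORT A =====
-- inner loop: for j in range(i+2, len(squares)): sumatory = sum(squares[i:j]); …
def pvInnerA (squares : List Int) (p : Int) (i : Nat) : List Nat → Bool
  | [] => false
  | j :: js =>
    let sumatory := (PySem.List.slice squares (some (i : Int)) (some (j : Int))).sum
    if sumatory = p then true
    else if sumatory > p then false
    else pvInnerA squares p i js

-- outer loop: for i in range(len(squares)): if squares[i] > p: break; …
def pvOuterA (squares : List Int) (p : Int) : List Nat → Bool
  | [] => false
  | i :: is' =>
    if PySem.List.pyGetD squares (i : Int) 0 > p then false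
    else if pvInnerA squares p i (List.range' (i + 2) (squares.length - (i + 2))) then true
    else pvOuterA squares p is'

def is_0125 (squares : List Int) (p : Int) : Bool :=
  pvOuterA squares p (List.range squares.length)

-- ===== PORT B =====
-- pref = [0]; acc = 0; for x in squares: acc += x; pref.append(acc)   (tail of pref built here)
def pvBuildPref (acc : Int) : List Int → List Int
  | [] => []
  | x :: xs => (acc + x) :: pvBuildPref (acc + x) xs

-- for j in range(i+2, n): w = pref[j] - base; …
def pvInnerB (pref : List Int) (p base : Int) : List Int → Bool
  | [] => false
  | j :: js =>
    let w := PySem.List.pyGetD pref j 0 - base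
    if w = p then true
    else if w > p then false
    else pvInnerB pref p base js

-- for i, x in enumerate(squares): if x > p: break; base = pref[i]; …
def pvOuterB (pref : List Int) (p : Int) (n : Int) : List (Int × Int) → Bool
  | [] => false
  | (i, x) :: rest =>
    if x > p then false
    else if pvInnerB pref p (PySem.List.pyGetD pref i 0) (PySem.List.pyRange (i + 2) n 1) then true
    else pvOuterB pref p n rest

def is_0125_alt (squares : List Int) (p : Int) : Bool :=
  let pref := 0 :: pvBuildPref 0 squares
  pvOuterB pref p (squares.length : Int) (PySem.List.enumerate squares 0)

-- ===== PRECONDITION & SPEC =====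
def Spec_is_0125 (squares : List Int) (p : Int) (out : Bool) : Prop := out = is_0125_alt squares p
instance (squares : List Int) (p : Int) (out : Bool) : Decidable (Spec_is_0125 squares p out) := by unfold Spec_is_0125; infer_instance

-- ===== CLAIM (what is proved, stated in full; the proofs are below) =====
def Claim_equal_is_0125 : Prop := ∀ (squares : List Int) (p : Int), Dom_is_0125 squares p → Spec_is_0125 squares p (is_0125 squares p)

-- ===== LEMMAS AND PROOFS =====

-- pref[k] is the sum of the first k elements
lemma pv_pref_getD : ∀ (xs : List Int) (k : Nat) (s : Int), k ≤ xs.length →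
    (s :: pvBuildPref s xs).getD k 0 = s + (xs.take k).sum
  | _, 0, s, _ => by simp
  | [], k + 1, s, h => by simp at h
  | x :: xs, k + 1, s, h => by
    have ih := pv_pref_getD xs k (s + x) (by simpa using h)
    simp [pvBuildPref, List.getD] at ih ⊢
    simpa [ih] using by ring

-- sum of a slice is a difference of prefix sums
lemma pv_slice_sum (xs : List Int) (i j : Nat) (hij : i ≤ j) :
    (PySem.List.slice xs (some (i : Int)) (some (j : Int))).sum
      = (xs.take j).sum - (xs.take i).sum := by
  rw [PySem.List.slice_natCast]
  have h : xs.take j = xs.take i ++ (xs.drop i).take (j - i) := by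
    rw [← List.take_add]
    congr 1
    omega
  rw [h, List.sum_append]
  ring

-- the two inner loops agree
lemma pv_inner_eq (squares : List Int) (p : Int) (i : Nat) (hi : i ≤ squares.length) :
    ∀ (m a : Nat), i ≤ a → squares.length ≤ a + m →
      pvInnerA squares p i (List.range' a (squares.length - a))
        = pvInnerB (0 :: pvBuildPref 0 squares) p
            ((0 :: pvBuildPref 0 squares).getD i 0)
            (PySem.List.pyRange (a : Int) (squares.length : Int) 1) := by
  intro m
  induction m with
  | zero =>
    intro a _ hle
    have h0 : squares.length - a = 0 := by omega
    rw [h0, PySem.List.pyRange_one_eq_nil (by exact_mod_cast hle)]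
    rfl
  | succ m ih =>
    intro a hia hle
    by_cases hab : a < squares.length
    · have hrange : List.range' a (squares.length - a)
          = a :: List.range' (a + 1) (squares.length - (a + 1)) := by
        have : squares.length - a = (squares.length - (a + 1)) + 1 := by omega
        rw [this, List.range'_succ]
      have hpy : PySem.List.pyRange (a : Int) (squares.length : Int) 1
          = (a : Int) :: PySem.List.pyRange ((a : Int) + 1) (squares.length : Int) 1 :=
        PySem.List.pyRange_one_cons (by exact_mod_cast hab)
      rw [hrange, hpy]
      show (if _ then _ else _) = _
      rw [pvInnerB]
      have hw : PySem.List.pyGetD (0 :: pvBuildPref 0 squares) ((a : Nat) : Int) 0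
            - (0 :: pvBuildPref 0 squares).getD i 0
          = (PySem.List.slice squares (some (i : Int)) (some (a : Int))).sum := by
        rw [PySem.List.pyGetD_natCast, pv_pref_getD squares a 0 (by omega),
          pv_pref_getD squares i 0 hi, pv_slice_sum squares i a hia]
        ring
      simp only [hw]
      split_ifs with h1 h2
      · rfl
      · rfl
      · have hcast : ((a : Int) + 1) = (((a + 1 : Nat)) : Int) := by push_cast; ring
        rw [hcast]
        exact ih (a + 1) (by omega) (by omega)
    · have h0 : squares.length - a = 0 := by omega
      rw [h0, PySem.List.pyRange_one_eq_nil (by exact_mod_cast (by omega : squares.length ≤ a))]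
      rfl

-- the two outer loops agree
lemma pv_outer_eq (squares : List Int) (p : Int) :
    ∀ (m k : Nat), k + m = squares.length →
      pvOuterA squares p (List.range' k m)
        = pvOuterB (0 :: pvBuildPref 0 squares) p (squares.length : Int)
            (PySem.List.enumerate (squares.drop k) (k : Int)) := by
  intro m
  induction m with
  | zero =>
    intro k hk
    have : squares.drop k = [] := by
      apply List.drop_eq_nil_of_le
      omega
    rw [this]
    rfl
  | succ m ih =>
    intro k hk
    have hklt : k < squares.length := by omega
    have hdrop : squares.drop k = squares[k] :: squares.drop (k + 1) :=
      List.drop_eq_getElem_cons hklt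
    rw [hdrop, List.range'_succ, PySem.List.enumerate_cons]
    show (if _ then _ else _) = _
    rw [pvOuterB]
    have hget : PySem.List.pyGetD squares ((k : Nat) : Int) 0 = squares[k] := by
      rw [PySem.List.pyGetD_natCast]
      exact List.getD_eq_getElem squares 0 hklt
    rw [hget]
    have hcast2 : ((k : Int) + 2) = (((k + 2 : Nat)) : Int) := by push_cast; ring
    have hinner := pv_inner_eq squares p k (by omega) (squares.length - (k + 2)) (k + 2)
      (by omega) (by omega)
    rw [PySem.List.pyGetD_natCast]
    rw [hcast2, ← hinner]
    have hcast1 : ((k : Int) + 1) = (((k + 1 : Nat)) : Int) := by push_cast; ring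
    rw [hcast1, ← ih (k + 1) (by omega)]

-- ===== VERDICT (by name: the statement is the Claim_ definition above) =====
theorem is_0125_spec : Claim_equal_is_0125 := by
  intro squares p _
  unfold Spec_is_0125 is_0125 is_0125_alt
  have h := pv_outer_eq squares p squares.length 0 (by omega)
  simpa [List.range_eq_range'] using h
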